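-- pv_equiv track=rewrite | github.com/sebastian-nunez/COP3530 | Python/Google 2  - 2022 (Optimal).py | find_magic_nums
-- ===== SOURCE A (Python) =====
-- def find_magic_nums(arr):
--     rows = len(arr)
--     cols = len(arr[0])
--
--     magic_nums = set([-1])
--     for i in range(rows):
--         for j in range(cols):
--             current = arr[i][j]
--
--             k = 0
--             row = []
--             while k < cols:
--                 if k == j:  # skip current
--                     k += 1
--                     continue
--
--                 row.append(arr[i][k])  # horizontal neighbors
--                 k += 1
--
--             sorted_row = sorted(row)
--             if row != sorted_row:
--                 continue
--
--             k = 0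
--             col = []
--             while k < rows:
--                 if k == i:  # skip current
--                     k += 1
--                     continue
--
--                 col.append(arr[k][j])  # vertical neighbors
--                 k += 1
--
--             sorted_col = sorted(col)
--             if col != sorted_col:
--                 continue
--
--             magic_nums.add(current)
--
--     return magic_nums
-- ===== SOURCE B (Python) =====
-- def find_magic_nums(arr):
--     rows = len(arr)
--     cols = len(arr[0])
--
--     # For a sequence vals, precompute prefix/suffix sortedness so that
--     # "vals with position j removed is sorted" is answered in O(1).
--     def ok_remove(vals):
--         m = len(vals)
--         pref = [True] * m
--         for t in range(1, m):
--             pref[t] = pref[t - 1] and vals[t - 1] <= vals[t]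
--         suff = [True] * m
--         for t in range(m - 2, -1, -1):
--             suff[t] = suff[t + 1] and vals[t] <= vals[t + 1]
--
--         def ok(j):
--             return ((j == 0 or pref[j - 1])
--                     and (j + 1 == m or suff[j + 1])
--                     and (j == 0 or j + 1 == m or vals[j - 1] <= vals[j + 1]))
--         return ok
--
--     row_ok = [ok_remove(arr[i][:cols]) for i in range(rows)]
--     col_ok = [ok_remove([arr[k][j] for k in range(rows)]) for j in range(cols)]
--
--     magic_nums = set([-1])
--     for i in range(rows):
--         for j in range(cols):
--             if row_ok[i](j) and col_ok[j](i):
--                 magic_nums.add(arr[i][j])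
--     return magic_nums
-- ===== Notes on version B (the rewrite author's own statement) =====
-- stated objective: faster
-- what changed: Instead of rebuilding and sorting the row/column with the cell removed for every cell, B precomputes per-row and per-column prefix/suffix sortedness arrays once, making each cell's removal check O(1).
import Mathlib
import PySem

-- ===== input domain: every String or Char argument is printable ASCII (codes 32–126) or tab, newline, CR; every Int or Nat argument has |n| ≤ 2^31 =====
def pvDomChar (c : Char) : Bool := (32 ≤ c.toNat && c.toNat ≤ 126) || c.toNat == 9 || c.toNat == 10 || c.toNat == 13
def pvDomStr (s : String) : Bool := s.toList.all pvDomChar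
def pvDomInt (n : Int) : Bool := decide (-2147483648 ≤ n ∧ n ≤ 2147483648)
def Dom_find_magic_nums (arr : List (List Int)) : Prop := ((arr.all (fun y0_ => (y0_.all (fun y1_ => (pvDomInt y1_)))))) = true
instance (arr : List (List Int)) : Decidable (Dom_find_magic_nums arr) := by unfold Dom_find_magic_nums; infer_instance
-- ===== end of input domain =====

-- B replaces A's per-cell "rebuild the row/column minus the cell and sort it" check by
-- per-row/per-column prefix/suffix sortedness computed once, so each cell check is O(1).

-- arr[i][k] for an in-range index (the default is never reached on admitted inputs)
def pvNth (r : List Int) (k : Nat) : Int := r.getD k 0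

-- ===== PORT A =====
def find_magic_nums (arr : List (List Int)) : List Int :=
  let rows := arr.length
  let cols := arr.headI.length
  (List.range rows).foldl (fun s i =>
    (List.range cols).foldl (fun s j =>
      let current := pvNth (arr.getD i []) j
      let row := (List.range cols).foldl
        (fun acc k => if k = j then acc else acc ++ [pvNth (arr.getD i []) k]) []
      if PySem.List.sorted row (fun x => x) false ≠ row then s
      else
        let col := (List.range rows).foldl
          (fun acc k => if k = i then acc else acc ++ [pvNth (arr.getD k []) j]) []
        if PySem.List.sorted col (fun x => x) false ≠ col then s
        else PySem.Set.add s current) s)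
    (PySem.Set.ofList [-1])

-- ===== PORT B =====
-- pref[t] of Source B: prefix vals[0..t] sorted (the cumulative-and recurrence of the loop)
def pvPref (vals : List Int) : Nat → Bool
  | 0 => true
  | t + 1 => pvPref vals t && decide (pvNth vals t ≤ pvNth vals (t + 1))

-- suff[t] of Source B: suffix vals[t..m-1] sorted (the right-to-left recurrence)
def pvSuff (vals : List Int) (m t : Nat) : Bool :=
  if _h : t + 1 < m then decide (pvNth vals t ≤ pvNth vals (t + 1)) && pvSuff vals m (t + 1)
  else true
termination_by m - t

-- ok(j) of Source B
def pvOkRemove (vals : List Int) (m j : Nat) : Bool :=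
  (j == 0 || pvPref vals (j - 1)) &&
  (j + 1 == m || pvSuff vals m (j + 1)) &&
  (j == 0 || j + 1 == m || decide (pvNth vals (j - 1) ≤ pvNth vals (j + 1)))

def find_magic_nums_alt (arr : List (List Int)) : List Int :=
  let rows := arr.length
  let cols := arr.headI.length
  let rowVals := arr.map (fun r => r.take cols)
  let colVals := (List.range cols).map (fun j => arr.map (fun r => pvNth r j))
  (List.range rows).foldl (fun s i =>
    (List.range cols).foldl (fun s j =>
      if pvOkRemove (rowVals.getD i []) cols j && pvOkRemove (colVals.getD j []) rows i
      then PySem.Set.add s (pvNth (arr.getD i []) j) else s) s)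
    (PySem.Set.ofList [-1])

-- ===== PRECONDITION & SPEC =====
-- Pre_ excludes exactly the inputs where Python A raises IndexError: the empty list
-- (arr[0]) and arrays with some row shorter than the first row (arr[i][k] / arr[k][j]).
def Pre_find_magic_nums (arr : List (List Int)) : Prop :=
  arr ≠ [] ∧ ∀ r ∈ arr, arr.headI.length ≤ r.length
instance (arr : List (List Int)) : Decidable (Pre_find_magic_nums arr) := by
  unfold Pre_find_magic_nums; infer_instance

def pvWitness_find_magic_nums : List (List Int) := [[1, 2], [3, 4]]

def Spec_find_magic_nums (arr : List (List Int)) (out : List Int) : Prop := out = find_magic_nums_alt arr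
instance (arr : List (List Int)) (out : List Int) : Decidable (Spec_find_magic_nums arr out) := by unfold Spec_find_magic_nums; infer_instance

-- ===== CLAIM (what is proved, stated in full; the proofs are below) =====
def Claim_equal_find_magic_nums : Prop := ∀ (arr : List (List Int)), Dom_find_magic_nums arr → Pre_find_magic_nums arr → Spec_find_magic_nums arr (find_magic_nums arr)

-- ===== LEMMAS AND PROOFS =====

-- "the sequence f restricted to [0, m) with position j removed is sorted", as index conditions
def RemOK (f : Nat → Int) (m j : Nat) : Prop :=
  (∀ k, k + 1 < j → f k ≤ f (k + 1)) ∧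
  (∀ k, j + 1 ≤ k → k + 1 < m → f k ≤ f (k + 1)) ∧
  (j = 0 ∨ j + 1 = m ∨ f (j - 1) ≤ f (j + 1))

theorem pvPref_iff (vals : List Int) (j : Nat) :
    pvPref vals j = true ↔ ∀ k, k + 1 ≤ j → pvNth vals k ≤ pvNth vals (k + 1) := by
  induction j with
  | zero => simp [pvPref]
  | succ t ih =>
      simp only [pvPref, Bool.and_eq_true, decide_eq_true_eq, ih]
      constructor
      · rintro ⟨h1, h2⟩ k hk
        rcases Nat.lt_or_ge (k + 1) (t + 1) with h | h
        · exact h1 k (by omega)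
        · have : k = t := by omega
          subst this; exact h2
      · intro h; exact ⟨fun k hk => h k (by omega), h t (by omega)⟩

theorem pvSuff_iff (vals : List Int) (m t : Nat) :
    pvSuff vals m t = true ↔ ∀ k, t ≤ k → k + 1 < m → pvNth vals k ≤ pvNth vals (k + 1) := by
  by_cases h : t + 1 < m
  · rw [pvSuff, dif_pos h]
    have ih := pvSuff_iff vals m (t + 1)
    simp only [Bool.and_eq_true, decide_eq_true_eq, ih]
    constructor
    · rintro ⟨h1, h2⟩ k hk hkm
      rcases Nat.lt_or_ge t k with h' | h'
      · exact h2 k (by omega) hkm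
      · have : k = t := by omega
        subst this; exact h1
    · intro hh; exact ⟨hh t (by omega) h, fun k hk hkm => hh k (by omega) hkm⟩
  · rw [pvSuff, dif_neg h]
    constructor
    · intro _ k hk hkm; omega
    · intro _; rfl
termination_by m - t

-- B's O(1) check says exactly RemOK
theorem pvOkRemove_iff (vals : List Int) (m j : Nat) :
    pvOkRemove vals m j = true ↔ RemOK (pvNth vals) m j := by
  simp only [pvOkRemove, RemOK, Bool.and_eq_true, Bool.or_eq_true, beq_iff_eq,
    decide_eq_true_eq, pvPref_iff, pvSuff_iff]
  constructor
  · rintro ⟨⟨h1, h2⟩, h3⟩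
    refine ⟨?_, ?_, ?_⟩
    · intro k hk
      rcases h1 with h | h
      · omega
      · exact h k (by omega)
    · intro k hk hkm
      rcases h2 with h | h
      · omega
      · exact h k hk hkm
    · rcases h3 with (h | h) | h
      exacts [Or.inl h, Or.inr (Or.inl h), Or.inr (Or.inr h)]
  · rintro ⟨h1, h2, h3⟩
    refine ⟨⟨?_, ?_⟩, ?_⟩
    · rcases Nat.eq_zero_or_pos j with h | h
      · exact Or.inl h
      · exact Or.inr (fun k hk => h1 k (by omega))
    · by_cases h' : j + 1 = m
      · exact Or.inl h'
      · exact Or.inr (fun k hk hkm => h2 k hk hkm)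
    · rcases h3 with h | h | h
      exacts [Or.inl (Or.inl h), Or.inl (Or.inr h), Or.inr h]

-- IsChain ≤ on a map over a range of indices
theorem chain_map_range' (f : Nat → Int) (n a : Nat) :
    List.IsChain (· ≤ ·) ((List.range' a n).map f) ↔
      ∀ k, a ≤ k → k + 1 < a + n → f k ≤ f (k + 1) := by
  induction n generalizing a with
  | zero =>
      simp only [List.range'_zero, List.map_nil]
      exact ⟨fun _ k h1 h2 => by omega, fun _ => List.isChain_nil⟩
  | succ n ih =>
      rw [List.range'_succ, List.map_cons, List.isChain_cons]
      rw [ih (a + 1)]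
      constructor
      · rintro ⟨h1, h2⟩ k hk hkn
        rcases Nat.lt_or_ge a k with h' | h'
        · exact h2 k (by omega) (by omega)
        · have : k = a := by omega
          subst this
          cases n with
          | zero => omega
          | succ n =>
              apply h1
              simp [List.range'_succ]
      · intro h
        refine ⟨?_, fun k hk hkn => h k (by omega) (by omega)⟩
        intro y hy
        cases n with
        | zero => simp at hy
        | succ n =>
            simp [List.range'_succ] at hy
            rw [← hy]
            exact h a (le_refl a) (by omega)

-- the row/col built by A's skip-loop, as filter+map
theorem removed_eq (f : Nat → Int) (m j : Nat) :
    (List.range m).foldl (fun acc k => if k = j then acc else acc ++ [f k]) []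
      = ((List.range m).filter (fun k => decide ¬ (k = j))).map f := by
  have h : (List.range m).foldl (fun acc k => if k = j then acc else acc ++ [f k]) ([] : List Int)
        = (List.range m).foldl (fun acc k => if ¬ (k = j) then acc ++ [f k] else acc) [] := by
    apply PySem.List.foldl_congr_mem
    intro acc' k _
    by_cases hk : k = j <;> simp [hk]
  rw [h]
  simpa using PySem.List.foldl_append_ite (fun k => ¬ (k = j)) f (List.range m) []

theorem filter_range_ne (m j : Nat) (hj : j < m) :
    (List.range m).filter (fun k => decide ¬ (k = j)) = List.range' 0 j ++ List.range' (j + 1) (m - j - 1) := by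
  obtain ⟨n, rfl⟩ : ∃ n, m = (j + 1) + n := ⟨m - j - 1, by omega⟩
  have hn : (j + 1) + n - j - 1 = n := by omega
  rw [hn, List.range_add, List.filter_append, List.range_succ, List.filter_append]
  have h1 : (List.range j).filter (fun k => decide ¬ (k = j)) = List.range j := by
    apply List.filter_eq_self.2
    intro k hk
    simp only [List.mem_range] at hk
    simp; omega
  have h2 : ([j].filter (fun k => decide ¬ (k = j))) = [] := by simp
  have h3 : (((List.range n).map (fun k => (j + 1) + k)).filter (fun k => decide ¬ (k = j)))
      = (List.range n).map (fun k => (j + 1) + k) := by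
    apply List.filter_eq_self.2
    intro k hk
    simp only [List.mem_map, List.mem_range] at hk
    obtain ⟨t, _, rfl⟩ := hk
    simp; omega
  rw [h1, h2, h3, List.append_nil]
  congr 1
  · exact List.range_eq_range'
  · rw [List.range'_eq_map_range]

-- sorted(l) == l ↔ Pairwise ≤
theorem sorted_eq_self_iff (l : List Int) :
    PySem.List.sorted l (fun x => x) false = l ↔ l.Pairwise (· ≤ ·) := by
  constructor
  · intro h
    have := PySem.List.sorted_pairwise l (fun x => x)
    rw [h] at this
    exact this
  · intro h
    exact PySem.List.sorted_eq_self_of_pairwise l (fun x => x) h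

-- A's removal-sortedness check, characterized by the same RemOK
theorem removed_sorted_iff (f : Nat → Int) (m j : Nat) (hj : j < m) :
    (PySem.List.sorted
        ((List.range m).foldl (fun acc k => if k = j then acc else acc ++ [f k]) [])
        (fun x => x) false
      = (List.range m).foldl (fun acc k => if k = j then acc else acc ++ [f k]) [])
    ↔ RemOK f m j := by
  rw [sorted_eq_self_iff, removed_eq, filter_range_ne m j hj, List.map_append]
  rw [← List.isChain_iff_pairwise, List.isChain_append]
  rw [chain_map_range' f j 0, chain_map_range' f (m - j - 1) (j + 1)]
  unfold RemOK
  constructor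
  · rintro ⟨h1, h2, h3⟩
    refine ⟨fun k hk => h1 k (by omega) (by omega),
            fun k hk hkm => h2 k hk (by omega), ?_⟩
    rcases Nat.eq_zero_or_pos j with h0 | h0
    · exact Or.inl h0
    rcases Nat.lt_or_ge (j + 1) m with hm' | hm'
    · refine Or.inr (Or.inr ?_)
      have hgl : ((List.range' 0 j).map f).getLast? = some (f (j - 1)) := by
        cases j with
        | zero => omega
        | succ t => rw [List.range'_1_concat, List.map_append]; simp
      have hhd : ((List.range' (j + 1) (m - j - 1)).map f).head? = some (f (j + 1)) := by
        have h5 : m - j - 1 = (m - j - 2) + 1 := by omega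
        rw [h5, List.range'_succ, List.map_cons]; rfl
      exact h3 _ hgl _ hhd
    · exact Or.inr (Or.inl (by omega))
  · rintro ⟨h1, h2, h3⟩
    refine ⟨fun k _ hk => h1 k (by omega), fun k hk hkm => h2 k hk (by omega), ?_⟩
    intro x hx y hy
    rcases h3 with h | h | h
    · subst h; simp at hx
    · have h5 : m - j - 1 = 0 := by omega
      rw [h5] at hy; simp at hy
    · have h0 : j ≠ 0 := by
        intro h0; rw [h0] at hx; simp at hx
      have hm' : j + 1 < m := by
        rcases Nat.lt_or_ge (j + 1) m with h' | h'
        · exact h'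
        · have h5 : m - j - 1 = 0 := by omega
          rw [h5] at hy; simp at hy
      have hgl : ((List.range' 0 j).map f).getLast? = some (f (j - 1)) := by
        cases j with
        | zero => exact absurd rfl h0
        | succ t => rw [List.range'_1_concat, List.map_append]; simp
      have hhd : ((List.range' (j + 1) (m - j - 1)).map f).head? = some (f (j + 1)) := by
        have h5 : m - j - 1 = (m - j - 2) + 1 := by omega
        rw [h5, List.range'_succ, List.map_cons]; rfl
      rw [hgl] at hx; rw [hhd] at hy
      simp at hx hy
      subst hx; subst hy
      exact h

-- RemOK only looks at indices below m (up to the j+1 = m disjunct)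
theorem RemOK_congr (f g : Nat → Int) (m j : Nat) (hj : j < m)
    (h : ∀ k, k < m → f k = g k) : (RemOK f m j ↔ RemOK g m j) := by
  unfold RemOK
  constructor
  all_goals
    rintro ⟨h1, h2, h3⟩
    refine ⟨?_, ?_, ?_⟩
  · intro k hk; rw [← h k (by omega), ← h (k+1) (by omega)]; exact h1 k hk
  · intro k hk hkm; rw [← h k (by omega), ← h (k+1) (by omega)]; exact h2 k hk hkm
  · rcases h3 with h' | h' | h'
    · exact Or.inl h'
    · exact Or.inr (Or.inl h')
    · rcases Nat.lt_or_ge (j + 1) m with hm' | hm'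
      · exact Or.inr (Or.inr (by rw [← h (j-1) (by omega), ← h (j+1) hm']; exact h'))
      · exact Or.inr (Or.inl (by omega))
  · intro k hk; rw [h k (by omega), h (k+1) (by omega)]; exact h1 k hk
  · intro k hk hkm; rw [h k (by omega), h (k+1) (by omega)]; exact h2 k hk hkm
  · rcases h3 with h' | h' | h'
    · exact Or.inl h'
    · exact Or.inr (Or.inl h')
    · rcases Nat.lt_or_ge (j + 1) m with hm' | hm'
      · exact Or.inr (Or.inr (by rw [h (j-1) (by omega), h (j+1) hm']; exact h'))
      · exact Or.inr (Or.inl (by omega))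

theorem nth_take (r : List Int) (c k : Nat) (hk : k < c) : pvNth (r.take c) k = pvNth r k := by
  simp only [pvNth, List.getD]
  rw [List.getElem?_take]
  simp [hk]

-- ===== VERDICT (by name: the statement is the Claim_ definition above) =====
theorem find_magic_nums_spec : Claim_equal_find_magic_nums := by
  intro arr _ _
  unfold Spec_find_magic_nums find_magic_nums find_magic_nums_alt
  apply PySem.List.foldl_congr_mem
  intro s i hi
  apply PySem.List.foldl_congr_mem
  intro s' j hj
  rw [List.mem_range] at hi hj
  have hrowD : arr.getD i [] = arr[i] := by
    simp [List.getD, List.getElem?_eq_getElem hi]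
  have hrowVals : (arr.map (fun r => r.take arr.headI.length)).getD i [] =
      arr[i].take arr.headI.length := by
    simp [List.getD, List.getElem?_map, List.getElem?_eq_getElem hi]
  have hcolVals : ((List.range arr.headI.length).map (fun j => arr.map (fun r => pvNth r j))).getD j [] =
      arr.map (fun r => pvNth r j) := by
    simp [List.getD, List.getElem?_map, List.getElem?_eq_getElem (by simpa using hj : j < (List.range arr.headI.length).length)]
  have hrow : (PySem.List.sorted
        ((List.range arr.headI.length).foldl (fun acc k => if k = j then acc else acc ++ [pvNth (arr.getD i []) k]) [])
        (fun x => x) false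
      = (List.range arr.headI.length).foldl (fun acc k => if k = j then acc else acc ++ [pvNth (arr.getD i []) k]) [])
      ↔ pvOkRemove ((arr.map (fun r => r.take arr.headI.length)).getD i []) arr.headI.length j = true := by
    rw [removed_sorted_iff _ _ _ hj, hrowVals, pvOkRemove_iff]
    exact (RemOK_congr _ _ _ _ hj (fun k hk => by rw [hrowD, nth_take _ _ _ hk])).symm
  have hcol : (PySem.List.sorted
        ((List.range arr.length).foldl (fun acc k => if k = i then acc else acc ++ [pvNth (arr.getD k []) j]) [])
        (fun x => x) false
      = (List.range arr.length).foldl (fun acc k => if k = i then acc else acc ++ [pvNth (arr.getD k []) j]) [])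
      ↔ pvOkRemove (((List.range arr.headI.length).map (fun j => arr.map (fun r => pvNth r j))).getD j []) arr.length i = true := by
    rw [removed_sorted_iff _ _ _ hi, hcolVals, pvOkRemove_iff]
    apply RemOK_congr _ _ _ _ hi
    intro k hk
    simp [pvNth, List.getD, List.getElem?_map, List.getElem?_eq_getElem hk]
  simp only [Bool.and_eq_true]
  by_cases hr : pvOkRemove ((arr.map (fun r => r.take arr.headI.length)).getD i []) arr.headI.length j = true <;>
    by_cases hc : pvOkRemove (((List.range arr.headI.length).map (fun j => arr.map (fun r => pvNth r j))).getD j []) arr.length i = true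
  · rw [if_neg (by rw [ne_eq, not_not]; exact hrow.2 hr), if_neg (by rw [ne_eq, not_not]; exact hcol.2 hc),
        if_pos ⟨hr, hc⟩]
  · rw [if_neg (by rw [ne_eq, not_not]; exact hrow.2 hr), if_pos (by rw [ne_eq]; intro h; exact hc (hcol.1 h)),
        if_neg (by rintro ⟨_, h⟩; exact hc h)]
  · rw [if_pos (by rw [ne_eq]; intro h; exact hr (hrow.1 h)), if_neg (by rintro ⟨h, _⟩; exact hr h)]
  · rw [if_pos (by rw [ne_eq]; intro h; exact hr (hrow.1 h)), if_neg (by rintro ⟨h, _⟩; exact hr h)]
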